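-- pv_equiv track=rewrite | github.com/mreshuu/STForensicMacOS | src/modules/system_info.py | _parse_diskutil_list
-- ===== SOURCE A (Python) =====
-- from typing import Dict, Any, List
--
-- def _parse_diskutil_list(output: str) -> List[Dict[str, Any]]:
--     """diskutil list çıktısını parse et"""
--     disks = []
--
--     try:
--         lines = output.strip().split('\n')
--         current_disk = {}
--
--         for line in lines:
--             if line.strip().startswith('/dev/'):
--                 if current_disk:
--                     disks.append(current_disk)
--                 current_disk = {"device": line.strip()}
--             elif current_disk and line.strip():
--                 current_disk["info"] = line.strip()
--
--         if current_disk: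
--             disks.append(current_disk)
--
--     except Exception:
--         pass
--
--     return disks
-- ===== SOURCE B (Python) =====
-- from typing import Dict, Any, List
--
-- def _parse_diskutil_list(output: str) -> List[Dict[str, Any]]:
--     """Segment-based parse: split lines at '/dev/' headers; last non-empty body line is the info."""
--     try:
--         lines = output.strip().split('\n')
--     except Exception:
--         return []
--
--     def is_dev(l):
--         return l.strip().startswith('/dev/')
--
--     n = len(lines)
--     res = []
--     i = 0
--     # ignore everything before the first device header
--     while i < n and not is_dev(lines[i]):
--         i += 1
--     while i < n:
--         k = i + 1
--         while k < n and not is_dev(lines[k]):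
--             k += 1
--         d = {"device": lines[i].strip()}
--         body = [s for s in (l.strip() for l in lines[i + 1:k]) if s]
--         if body:
--             d["info"] = body[-1]
--         res.append(d)
--         i = k
--     return res
-- ===== Notes on version B (the rewrite author's own statement) =====
-- stated objective: alternative
-- what changed: Replaces A's single stateful loop carrying a mutable current-disk dict with a segment decomposition: find the '/dev/' header positions, skip the preamble, and build each disk dict from its whole segment at once (info = last non-empty body line).
import Mathlib
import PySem

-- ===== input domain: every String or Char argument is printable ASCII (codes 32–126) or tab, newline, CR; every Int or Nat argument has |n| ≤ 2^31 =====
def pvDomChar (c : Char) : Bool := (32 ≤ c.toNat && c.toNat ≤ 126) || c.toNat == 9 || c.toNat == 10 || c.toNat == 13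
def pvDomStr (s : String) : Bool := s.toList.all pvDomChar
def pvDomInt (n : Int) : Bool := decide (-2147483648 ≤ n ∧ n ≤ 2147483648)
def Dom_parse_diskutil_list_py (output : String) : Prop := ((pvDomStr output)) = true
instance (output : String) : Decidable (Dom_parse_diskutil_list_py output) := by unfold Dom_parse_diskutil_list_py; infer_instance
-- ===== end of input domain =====

-- B replaces A's stateful one-pass loop by a segment decomposition at '/dev/' header lines
-- (info = last non-empty body line of the segment); same return value, no speed claim.

-- ===== PORT A =====
-- dict assignment d[k] = v on an association list (overwrite in place, new key appends)
def pvSetItem (d : List (String × String)) (k v : String) : List (String × String) :=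
  if d.any (fun p => p.1 == k) then d.map (fun p => if p.1 == k then (k, v) else p)
  else d ++ [(k, v)]

-- one iteration of A's for-loop; state = (disks, current_disk)
def pvStepA (st : List (List (String × String)) × List (String × String)) (line : String) :
    List (List (String × String)) × List (String × String) :=
  let s := PySem.Str.strip line
  if PySem.Str.startswith s "/dev/" then
    ((if st.2 ≠ [] then st.1 ++ [st.2] else st.1), [("device", s)])
  else if st.2 ≠ [] ∧ s ≠ "" then (st.1, pvSetItem st.2 "info" s)
  else st

-- output.strip().split('\n'); the separator "\n" is non-empty, so split? is always `some` (getD unreachable)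
def pvSplitNL (s : String) : List String := (PySem.Str.split? s "\n").getD []

def parse_diskutil_list_py (output : String) : List (List (String × String)) :=
  let lines := pvSplitNL (PySem.Str.strip output)
  let st := lines.foldl pvStepA ([], [])
  if st.2 ≠ [] then st.1 ++ [st.2] else st.1

-- ===== PORT B =====
def pvIsDev (l : String) : Bool := PySem.Str.startswith (PySem.Str.strip l) "/dev/"

-- B's segment loop: header, then body up to the next header (k-search = takeWhile/dropWhile)
def pvParseSegs : List String → List (List (String × String))
  | [] => []
  | h :: rest =>
    let body := rest.takeWhile (fun l => !pvIsDev l)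
    let rest' := rest.dropWhile (fun l => !pvIsDev l)
    let strips := (body.map PySem.Str.strip).filter (fun s => s ≠ "")
    (match strips.getLast? with
     | some i => [("device", PySem.Str.strip h), ("info", i)]
     | none => [("device", PySem.Str.strip h)]) :: pvParseSegs rest'
termination_by ls => ls.length
decreasing_by
  simp only [List.length_cons]
  exact Nat.lt_succ_of_le (List.length_dropWhile_le _ _)

def parse_diskutil_list_py_alt (output : String) : List (List (String × String)) :=
  let lines := pvSplitNL (PySem.Str.strip output)
  pvParseSegs (lines.dropWhile (fun l => !pvIsDev l))

-- ===== PRECONDITION & SPEC =====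
def Spec_parse_diskutil_list_py (output : String) (out : List (List (String × String))) : Prop := out = parse_diskutil_list_py_alt output
instance (output : String) (out : List (List (String × String))) : Decidable (Spec_parse_diskutil_list_py output out) := by unfold Spec_parse_diskutil_list_py; infer_instance

-- ===== CLAIM (what is proved, stated in full; the proofs are below) =====
def Claim_equal_parse_diskutil_list_py : Prop := ∀ (output : String), Dom_parse_diskutil_list_py output → Spec_parse_diskutil_list_py output (parse_diskutil_list_py output)

-- ===== LEMMAS AND PROOFS =====

-- current_disk as a function of the header (already stripped) and the optional info value
def pvDictOf (h : String) : Option String → List (String × String)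
  | some i => [("device", h), ("info", i)]
  | none => [("device", h)]

-- A's epilogue ("if current_disk: disks.append(current_disk)")
def pvFinalize (st : List (List (String × String)) × List (String × String)) :
    List (List (String × String)) :=
  if st.2 ≠ [] then st.1 ++ [st.2] else st.1

theorem pvDictOf_ne_nil (h : String) (info : Option String) : pvDictOf h info ≠ [] := by
  cases info <;> simp [pvDictOf]

theorem pvSetItem_dictOf (h s : String) (info : Option String) :
    pvSetItem (pvDictOf h info) "info" s = pvDictOf h (some s) := by
  cases info <;> simp [pvSetItem, pvDictOf]

theorem pvParseSegs_cons (h : String) (rest : List String) :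
    pvParseSegs (h :: rest) =
      pvDictOf (PySem.Str.strip h)
        ((((rest.takeWhile (fun l => !pvIsDev l)).map PySem.Str.strip).filter
            (fun s => s ≠ "")).getLast?) ::
      pvParseSegs (rest.dropWhile (fun l => !pvIsDev l)) := by
  rw [pvParseSegs]
  cases (((rest.takeWhile (fun l => !pvIsDev l)).map PySem.Str.strip).filter
      (fun s => s ≠ "")).getLast? <;> simp [pvDictOf]

theorem pvGetLast?_or_cons {α : Type} (a : α) (xs : List α) (info : Option α) :
    ((a :: xs).getLast?).or info = (xs.getLast?).or (some a) := by
  cases xs with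
  | nil => simp
  | cons b t =>
    rw [List.getLast?_cons_cons]
    cases hg : (b :: t).getLast? with
    | none => simp [List.getLast?_eq_none_iff] at hg
    | some v => simp

-- invariant while a current disk (header h, info) is open
theorem pvLoop_some (ls : List String) :
    ∀ (disks : List (List (String × String))) (h : String) (info : Option String),
    pvFinalize (ls.foldl pvStepA (disks, pvDictOf h info)) =
      disks ++ pvDictOf h
          ((((ls.takeWhile (fun l => !pvIsDev l)).map PySem.Str.strip).filter
              (fun s => s ≠ "")).getLast?.or info) ::
        pvParseSegs (ls.dropWhile (fun l => !pvIsDev l)) := by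
  induction ls with
  | nil =>
    intro disks h info
    simp [pvFinalize, pvDictOf_ne_nil, pvParseSegs]
  | cons l t ih =>
    intro disks h info
    have hne := pvDictOf_ne_nil h info
    by_cases hd : pvIsDev l = true
    · have hstep : pvStepA (disks, pvDictOf h info) l
          = (disks ++ [pvDictOf h info], pvDictOf (PySem.Str.strip l) none) := by
      -- the if-condition of pvStepA is pvIsDev l by definition
        simp only [pvStepA]
        rw [show PySem.Str.startswith (PySem.Str.strip l) "/dev/" = pvIsDev l from rfl, hd]
        simp only [ne_eq, hne, not_false_eq_true, if_true]
        simp [pvDictOf]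
      rw [List.foldl_cons, hstep, ih, List.takeWhile_cons, List.dropWhile_cons]
      simp [hd, pvParseSegs_cons]
    · have hd' : pvIsDev l = false := by simpa using hd
      by_cases hs : PySem.Str.strip l = ""
      · have hstep : pvStepA (disks, pvDictOf h info) l = (disks, pvDictOf h info) := by
          simp only [pvStepA]
          rw [show PySem.Str.startswith (PySem.Str.strip l) "/dev/" = pvIsDev l from rfl, hd']
          simp [hs]
        rw [List.foldl_cons, hstep, ih, List.takeWhile_cons, List.dropWhile_cons]
        simp [hd', hs]
      · have hstep : pvStepA (disks, pvDictOf h info) l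
            = (disks, pvDictOf h (some (PySem.Str.strip l))) := by
          simp only [pvStepA]
          rw [show PySem.Str.startswith (PySem.Str.strip l) "/dev/" = pvIsDev l from rfl, hd']
          simp only [ne_eq, hne, not_false_eq_true, true_and]
          simp [hs, pvSetItem_dictOf]
        rw [List.foldl_cons, hstep, ih, List.takeWhile_cons, List.dropWhile_cons]
        simp only [hd', Bool.not_false, if_true, List.map_cons]
        rw [List.filter_cons_of_pos (by simp [hs]), pvGetLast?_or_cons]

-- invariant before the first device header (current_disk empty)
theorem pvLoop_none (ls : List String) :
    ∀ (disks : List (List (String × String))),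
    pvFinalize (ls.foldl pvStepA (disks, [])) =
      disks ++ pvParseSegs (ls.dropWhile (fun l => !pvIsDev l)) := by
  induction ls with
  | nil => intro disks; simp [pvFinalize, pvParseSegs]
  | cons l t ih =>
    intro disks
    by_cases hd : pvIsDev l = true
    · have hstep : pvStepA (disks, []) l = (disks, pvDictOf (PySem.Str.strip l) none) := by
        simp only [pvStepA]
        rw [show PySem.Str.startswith (PySem.Str.strip l) "/dev/" = pvIsDev l from rfl, hd]
        simp [pvDictOf]
      rw [List.foldl_cons, hstep, pvLoop_some, List.dropWhile_cons]
      simp [hd, pvParseSegs_cons]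
    · have hd' : pvIsDev l = false := by simpa using hd
      have hstep : pvStepA (disks, []) l = (disks, []) := by
        simp only [pvStepA]
        rw [show PySem.Str.startswith (PySem.Str.strip l) "/dev/" = pvIsDev l from rfl, hd']
        simp
      rw [List.foldl_cons, hstep, ih, List.dropWhile_cons]
      simp [hd']

-- ===== VERDICT (by name: the statement is the Claim_ definition above) =====
theorem parse_diskutil_list_py_spec : Claim_equal_parse_diskutil_list_py := by
  intro output _
  unfold Spec_parse_diskutil_list_py parse_diskutil_list_py parse_diskutil_list_py_alt
  exact pvLoop_none _ []
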